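-- pv_equiv track=rewrite | github.com/0xStryK3R/Scaler-DSA-Revision | python/Day-33/HW_1.py | solve
-- ===== SOURCE A (Python) =====
-- def solve(A):
--     mod = 10**9 + 7
--
--     cnt_dict = {}
--     for i in A:
--         cnt_dict.setdefault(i, 0)
--         cnt_dict[i] += 1
--
--     ans = 0
--
--     for i, i_cnt in cnt_dict.items():
--         for j, j_cnt in cnt_dict.items():
--             ans = ans + i_cnt * j_cnt * (i % j)
--             ans = ans % mod
--
--     return ans
-- ===== SOURCE B (Python) =====
-- def solve(A):
--     mod = 10**9 + 7
--
--     cnt = {}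
--     for x in A:
--         cnt[x] = cnt.get(x, 0) + 1
--     items = [(v, cnt[v]) for v in sorted(cnt)]
--     k = len(items)
--
--     def block_sum(j):
--         # sum of c * (v % j) over items, walking the sorted values one
--         # equal-quotient block at a time: inside a block every value has the
--         # same quotient q = v // j, so it contributes c*v - j*q*c with no
--         # per-element division.
--         s = 0
--         idx = 0
--         while idx < k:
--             v, c = items[idx]
--             q = v // j
--             t = (q + 1) * j if j > 0 else q * j + 1   # block = values < t
--             bc = c
--             bw = c * v
--             idx += 1
--             while idx < k and items[idx][0] < t:
--                 v2, c2 = items[idx]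
--                 bc += c2
--                 bw += c2 * v2
--                 idx += 1
--             s += bw - j * q * bc
--         return s
--
--     total = 0
--     for j, cj in items:
--         total += cj * block_sum(j)
--     return total % mod
-- ===== Notes on version B (the rewrite author's own statement) =====
-- stated objective: alternative
-- what changed: B sorts the distinct values and, for each divisor j, walks the sorted list in blocks of equal quotient q = v//j, adding each block's contribution blockWeight - j*q*blockCount from two running block sums, so i%j is never computed per pair (one floordiv per block, one final mod), instead of A's nested dict-items loops taking a mod per pair.
-- outside the precondition, e.g. on solve([3, 0]): A raises ZeroDivisionError, B raises ZeroDivisionError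
import Mathlib
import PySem

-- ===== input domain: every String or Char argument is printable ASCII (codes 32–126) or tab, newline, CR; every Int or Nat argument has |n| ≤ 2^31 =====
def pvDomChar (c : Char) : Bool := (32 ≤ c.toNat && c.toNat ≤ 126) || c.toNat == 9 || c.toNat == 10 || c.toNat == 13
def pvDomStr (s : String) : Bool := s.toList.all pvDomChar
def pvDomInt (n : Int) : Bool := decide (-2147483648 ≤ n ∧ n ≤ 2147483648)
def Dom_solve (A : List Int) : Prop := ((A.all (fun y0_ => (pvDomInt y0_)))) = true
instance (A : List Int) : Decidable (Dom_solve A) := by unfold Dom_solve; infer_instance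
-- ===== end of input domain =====

-- B sorts the distinct values and sums per divisor j over blocks of equal quotient v//j
-- (two running block sums, no per-pair mod), instead of A's nested dict loops with a mod per pair.

-- ===== PORT A =====
def solve (A : List Int) : Int :=
  let m : Int := 10 ^ 9 + 7
  let cnt := A.foldl (fun d i =>
    let d' := PySem.Dict.setdefault d i 0
    d'.insert i (d'.getD i 0 + 1)) PySem.Dict.empty
  cnt.items.foldl (fun ans p =>
    cnt.items.foldl (fun ans q =>
      PySem.Int.mod (ans + p.2 * q.2 * (PySem.Int.mod p.1 q.1)) m) ans) 0

-- ===== PORT B =====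
-- Source B's inner 'while idx < k and items[idx][0] < t' loop: consumes one block, accumulating its
-- count bc and weight bw (the Python index loop over items[idx:] is ported as the obvious
-- structural recursion on the remaining suffix of items; exact — idx only ever advances)
def blockScan (t : Int) : List (Int × Int) → Int → Int → Int × Int × List (Int × Int)
  | [], bc, bw => (bc, bw, [])
  | (v, c) :: rest, bc, bw =>
    if v < t then blockScan t rest (bc + c) (bw + c * v) else (bc, bw, (v, c) :: rest)

-- termination measure for blockSumLoop (the port cites it in decreasing_by)
theorem blockScan_suffix_length (t : Int) (L : List (Int × Int)) :
    ∀ bc bw, (blockScan t L bc bw).2.2.length ≤ L.length := by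
  induction L with
  | nil => intro bc bw; simp [blockScan]
  | cons p rest ih =>
    intro bc bw
    obtain ⟨v, c⟩ := p
    simp only [blockScan]
    split
    · exact le_trans (ih _ _) (by simp)
    · simp

-- Source B's outer 'while idx < k' loop of block_sum: one floordiv per block
def blockSumLoop (j : Int) : List (Int × Int) → Int → Int
  | [], s => s
  | (v, c) :: rest, s =>
    let q := PySem.Int.floordiv v j
    let t := if 0 < j then (q + 1) * j else q * j + 1
    let r := blockScan t rest c (c * v)
    blockSumLoop j r.2.2 (s + (r.2.1 - j * q * r.1))
termination_by L => L.length
decreasing_by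
  simpa using Nat.lt_succ_of_le (blockScan_suffix_length t rest c (c * v))

def solve_alt (A : List Int) : Int :=
  let m : Int := 10 ^ 9 + 7
  let cnt := A.foldl (fun d x => d.insert x (d.getD x 0 + 1)) (PySem.Dict.empty : PySem.Dict Int Int)
  let items := (PySem.List.sorted cnt.keys (fun x => x) false).map (fun v => (v, cnt.getD v 0))
  let total := items.foldl (fun tot p => tot + p.2 * blockSumLoop p.1 items 0) 0
  PySem.Int.mod total m

-- ===== PRECONDITION & SPEC =====
-- Pre_ excludes inputs containing 0: there Python's A raises ZeroDivisionError on i % 0 (and B on v // 0).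
def Pre_solve (A : List Int) : Prop := (0 : Int) ∉ A
instance (A : List Int) : Decidable (Pre_solve A) := by unfold Pre_solve; infer_instance
def pvWitness_solve : List Int := [3, -2, 3, 7]

def Spec_solve (A : List Int) (out : Int) : Prop := out = solve_alt A
instance (A : List Int) (out : Int) : Decidable (Spec_solve A out) := by unfold Spec_solve; infer_instance

-- ===== CLAIM (what is proved, stated in full; the proofs are below) =====
def Claim_equal_solve : Prop := ∀ (A : List Int), Dom_solve A → Pre_solve A → Spec_solve A (solve A)

-- ===== LEMMAS AND PROOFS =====

-- A's setdefault-then-increment step is the plain get-based increment step.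
theorem stepA_eq_stepB (d : PySem.Dict Int Int) (i : Int) :
    (let d' := PySem.Dict.setdefault d i 0
     d'.insert i (d'.getD i 0 + 1)) = d.insert i (d.getD i 0 + 1) := by
  by_cases h : d.contains i = true
  · simp [PySem.Dict.setdefault_of_contains, h]
  · have h' : d.contains i = false := by simpa using h
    simp [PySem.Dict.setdefault_of_not_contains, h', PySem.Dict.getD_insert_self,
      PySem.Dict.getD_of_not_contains, PySem.Dict.insert_insert_self]

-- a stepwise-mod accumulation over a NONEMPTY list is the final sum mod m
theorem modfold {α : Type} (m : Int) (hm : 0 < m) (f : α → Int) (L : List α) (hL : L ≠ []) :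
    ∀ a : Int, L.foldl (fun ans t => PySem.Int.mod (ans + f t) m) a
      = PySem.Int.mod (a + (L.map f).sum) m := by
  induction L with
  | nil => exact absurd rfl hL
  | cons x xs ih =>
    intro a
    cases xs with
    | nil => simp
    | cons y ys =>
      have hxs : (y :: ys) ≠ [] := by simp
      rw [List.foldl_cons, ih hxs]
      simp only [List.map_cons, List.sum_cons, PySem.Int.mod_eq_emod_of_pos hm]
      rw [Int.emod_add_emod]
      ring_nf

theorem sum_linear {α : Type} (ls : List α) (f g : α → Int) (c1 c2 : Int) :
    (ls.map (fun x => c1 * f x + c2 * g x)).sum = c1 * (ls.map f).sum + c2 * (ls.map g).sum := by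
  induction ls with
  | nil => simp
  | cons x xs ih => simp [ih]; ring

theorem sum_swap {α : Type} (ls1 ls2 : List α) (h : α → α → Int) :
    (ls1.map (fun p => (ls2.map (h p)).sum)).sum
      = (ls2.map (fun q => (ls1.map (fun p => h p q)).sum)).sum := by
  induction ls1 with
  | nil => simp
  | cons x xs ih =>
    have : (ls2.map (fun q => (h x q) + ((xs.map (fun p => h p q)).sum))).sum
        = (ls2.map (h x)).sum + (ls2.map (fun q => (xs.map (fun p => h p q)).sum)).sum := by
      have := sum_linear ls2 (h x) (fun q => (xs.map (fun p => h p q)).sum) 1 1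
      simp only [one_mul] at this
      exact this
    simp [ih, this]

-- blockScan is takeWhile/dropWhile with running count and weight sums
theorem blockScan_eq (t : Int) (L : List (Int × Int)) : ∀ bc bw,
    blockScan t L bc bw
      = (bc + ((L.takeWhile (fun p => decide (p.1 < t))).map (fun p => p.2)).sum,
         bw + ((L.takeWhile (fun p => decide (p.1 < t))).map (fun p => p.2 * p.1)).sum,
         L.dropWhile (fun p => decide (p.1 < t))) := by
  induction L with
  | nil => intro bc bw; simp [blockScan]
  | cons p rest ih =>
    intro bc bw
    obtain ⟨v, c⟩ := p
    by_cases h : v < t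
    · simp [blockScan, h, ih]
      constructor <;> ring
    · simp [blockScan, h]

-- every value of a block (head's value ≤ x < block bound t) has the head's quotient
theorem floordiv_eq_of_block (j v x q : Int) (hj : j ≠ 0) (hq : PySem.Int.floordiv v j = q)
    (hle : v ≤ x) (hlt : x < if 0 < j then (q + 1) * j else q * j + 1) :
    PySem.Int.floordiv x j = q := by
  rcases lt_or_gt_of_ne hj with hneg | hpos
  · simp only [if_neg (not_lt.mpr (le_of_lt hneg))] at hlt
    have hb := PySem.Int.mod_neg_bounds v hneg
    have hv := PySem.Int.floordiv_mul_add_mod v j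
    rw [hq] at hv
    have hvlb : (q + 1) * j < v := by nlinarith
    rw [← PySem.Int.floordiv_neg_neg, PySem.Int.floordiv_eq_iff_of_pos (by omega)]
    constructor <;> nlinarith
  · simp only [if_pos hpos] at hlt
    have hb1 := PySem.Int.mod_nonneg v hpos
    have hb2 := PySem.Int.mod_lt v hpos
    have hv := PySem.Int.floordiv_mul_add_mod v j
    rw [hq] at hv
    rw [PySem.Int.floordiv_eq_iff_of_pos hpos]
    constructor <;> nlinarith

-- blockSumLoop computes the per-divisor sum of c * (v % j) on a strictly increasing list
theorem blockSumLoop_eq (j : Int) (hj : j ≠ 0) : ∀ (n : Nat) (L : List (Int × Int)),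
    L.length ≤ n → L.Pairwise (fun p q => p.1 < q.1) → ∀ s,
    blockSumLoop j L s = s + (L.map (fun p => p.2 * PySem.Int.mod p.1 j)).sum := by
  intro n
  induction n with
  | zero =>
    intro L hL _ s
    rw [List.eq_nil_of_length_eq_zero (Nat.le_zero.mp hL)]
    simp [blockSumLoop]
  | succ n ih =>
    intro L hL hpw s
    cases L with
    | nil => simp [blockSumLoop]
    | cons p rest =>
      obtain ⟨v, c⟩ := p
      rw [List.pairwise_cons] at hpw
      obtain ⟨hhead, hrest⟩ := hpw
      rw [blockSumLoop]
      set q := PySem.Int.floordiv v j with hq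
      set t := if 0 < j then (q + 1) * j else q * j + 1 with ht
      rw [blockScan_eq]
      set f : Int × Int → Bool := fun p => decide (p.1 < t) with hf
      set pre := rest.takeWhile f with hpre
      set suf := rest.dropWhile f with hsuf
      have hsplit : pre ++ suf = rest := List.takeWhile_append_dropWhile
      have hsuflen : suf.length ≤ n := by
        have : suf.Sublist rest := List.dropWhile_sublist f
        have := this.length_le
        simp at hL
        omega
      have hsufpw : suf.Pairwise (fun p q => p.1 < q.1) :=
        hrest.sublist (List.dropWhile_sublist f)
      rw [ih suf hsuflen hsufpw]
      have hpreq : ∀ p ∈ pre, PySem.Int.mod p.1 j = p.1 - q * j := by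
        intro p hp
        have hmem : p ∈ rest := (List.takeWhile_sublist f).mem hp
        have hlt : p.1 < t := by
          have := List.mem_takeWhile_imp hp
          simpa [hf] using this
        have hfd : PySem.Int.floordiv p.1 j = q :=
          floordiv_eq_of_block j v p.1 q hj rfl (le_of_lt (hhead p hmem)) (by rw [← ht]; exact hlt)
        have := PySem.Int.floordiv_mul_add_mod p.1 j
        rw [hfd] at this
        linarith
      have hpresum : (pre.map (fun p => p.2 * PySem.Int.mod p.1 j)).sum
          = (pre.map (fun p => p.2 * p.1)).sum - j * q * (pre.map (fun p => p.2)).sum := by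
        have hcongr : pre.map (fun p => p.2 * PySem.Int.mod p.1 j)
            = pre.map (fun p => 1 * (p.2 * p.1) + (-(j * q)) * p.2) := by
          apply List.map_congr_left
          intro p hp
          rw [hpreq p hp]
          ring
        rw [hcongr, sum_linear]
        ring
      have hvmod : PySem.Int.mod v j = v - q * j := by
        have := PySem.Int.floordiv_mul_add_mod v j
        rw [← hq] at this
        linarith
      rw [← hsplit]
      simp only [List.map_cons, List.map_append, List.sum_cons, List.sum_append]
      rw [hpresum, hvmod]
      ring

-- A's stepwise-mod double loop over items is the final double sum mod m
theorem coreA (ls : List (Int × Int)) (hL : ls ≠ []) :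
    ls.foldl (fun ans p =>
      ls.foldl (fun ans q =>
        PySem.Int.mod (ans + p.2 * q.2 * (PySem.Int.mod p.1 q.1)) (10 ^ 9 + 7)) ans) 0
    = PySem.Int.mod ((ls.map (fun p =>
        (ls.map (fun q => p.2 * q.2 * PySem.Int.mod p.1 q.1)).sum)).sum) (10 ^ 9 + 7) := by
  have hm : (0 : Int) < 10 ^ 9 + 7 := by norm_num
  have hinner : ∀ (p : Int × Int) (a : Int),
      ls.foldl (fun ans q =>
        PySem.Int.mod (ans + p.2 * q.2 * (PySem.Int.mod p.1 q.1)) (10 ^ 9 + 7)) a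
      = PySem.Int.mod (a + (ls.map (fun q => p.2 * q.2 * PySem.Int.mod p.1 q.1)).sum)
          (10 ^ 9 + 7) := fun p a =>
    modfold _ hm (fun q => p.2 * q.2 * PySem.Int.mod p.1 q.1) ls hL a
  simp only [hinner]
  rw [modfold _ hm (fun p => (ls.map (fun q => p.2 * q.2 * PySem.Int.mod p.1 q.1)).sum) ls hL 0]
  rw [zero_add]

-- the two programs agree on every zero-free input
theorem main_eq (A : List Int) (hpre : (0 : Int) ∉ A) : solve A = solve_alt A := by
  unfold solve solve_alt
  simp only [stepA_eq_stepB, PySem.Dict.foldl_insert_getD_add_one_eq_counter,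
    PySem.Dict.items_counter, PySem.Dict.keys_counter, PySem.Dict.getD_counter]
  rcases eq_or_ne A [] with rfl | hA
  · norm_num [PySem.Set.ofList, PySem.List.sorted, PySem.Int.mod]
  · set g : Int → Int × Int := fun v => (v, (A.count v : Int)) with hg
    set IA := (PySem.Set.ofList A).map g with hIA
    set vals := PySem.List.sorted (PySem.Set.ofList A) (fun x => x) false with hvals
    set IB := vals.map g with hIB
    have hperm : IB.Perm IA := (PySem.List.sorted_perm _ _ _).map g
    have hIAne : IA ≠ [] := by
      obtain ⟨x, hx⟩ := List.exists_mem_of_ne_nil A hA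
      have : g x ∈ IA := List.mem_map_of_mem ((PySem.Set.mem_ofList A x).mpr hx)
      exact List.ne_nil_of_mem this
    have hpw : IB.Pairwise (fun p q => p.1 < q.1) := by
      have := PySem.List.sorted_ofList_pairwise_lt (κ := Int) A
      exact List.pairwise_map.mpr (by simpa [hg] using this)
    have hne0 : ∀ p ∈ IB, p.1 ≠ 0 := by
      intro p hp
      obtain ⟨v, hv, rfl⟩ := List.mem_map.mp hp
      have : v ∈ A := (PySem.Set.mem_ofList A v).mp ((PySem.List.mem_sorted _ _ _ v).mp hv)
      intro h0
      have h0' : v = 0 := by simpa [hg] using h0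
      exact hpre (h0' ▸ this)
    rw [coreA IA hIAne, PySem.List.foldl_add, zero_add]
    congr 1
    have hBS : IB.map (fun p => p.2 * blockSumLoop p.1 IB 0)
        = IB.map (fun p => p.2 * (IB.map (fun i => i.2 * PySem.Int.mod i.1 p.1)).sum) := by
      apply List.map_congr_left
      intro p hp
      rw [blockSumLoop_eq p.1 (hne0 p hp) IB.length IB le_rfl hpw 0, zero_add]
    rw [hBS]
    have hinnerP : IB.map (fun p => p.2 * (IB.map (fun i => i.2 * PySem.Int.mod i.1 p.1)).sum)
        = IB.map (fun p => p.2 * (IA.map (fun i => i.2 * PySem.Int.mod i.1 p.1)).sum) := by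
      apply List.map_congr_left
      intro p _
      congr 1
      exact (hperm.map _).sum_eq
    rw [hinnerP]
    rw [(hperm.map (fun p => p.2 * (IA.map (fun i => i.2 * PySem.Int.mod i.1 p.1)).sum)).sum_eq]
    rw [sum_swap IA IA (fun p q => p.2 * q.2 * PySem.Int.mod p.1 q.1)]
    apply congrArg List.sum
    apply List.map_congr_left
    intro q _
    rw [← List.sum_map_mul_left]
    apply congrArg List.sum
    apply List.map_congr_left
    intro p _
    ring

-- ===== VERDICT (by name: the statement is the Claim_ definition above) =====
theorem solve_spec : Claim_equal_solve := by
  intro A _ hpre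
  exact main_eq A hpre
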